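-- pv_equiv track=rewrite | github.com/Sai5810/TJHSST-Artificial-Intelligence | Artificial Intelligence/L3 HeapPriorityQueue/Vaka_Sai_U1_L3.py | isHeap
-- ===== SOURCE A (Python) =====
-- def isHeap(heap, k):
--     left, right = 2 * k, 2 * k + 1
--     if left == len(heap):
--         return True
--     elif len(heap) == right and heap[k] > heap[left]:
--         return False
--     elif right < len(heap):
--         if heap[k] > heap[left] or heap[k] > heap[right]:
--             return False
--         else:
--             return isHeap(heap, left) and isHeap(heap, right)
--     return True
-- ===== SOURCE B (Python) =====
-- # Iterative re-implementation: explicit stack worklist instead of recursion.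
-- def isHeap(heap, k):
--     n = len(heap)
--     stack = [k]
--     while stack:
--         node = stack.pop()
--         left, right = 2 * node, 2 * node + 1
--         if left == n:
--             continue
--         elif right == n:
--             if heap[node] > heap[left]:
--                 return False
--         elif right < n:
--             if heap[node] > heap[left] or heap[node] > heap[right]:
--                 return False
--             stack.append(left)
--             stack.append(right)
--     return True
-- ===== Notes on version B (the rewrite author's own statement) =====
-- stated objective: alternative
-- what changed: Replaces A's binary recursion with an iterative worklist loop over an explicit stack seeded with [k], popping a node, checking its heap property and pushing its two children.
-- outside the precondition, e.g. on isHeap([5, 1, 9], -1): A returns False, B returns False; on isHeap([0, 0, 5, 1], -1): A returns False, B does not finish within the time limit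
import Mathlib
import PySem

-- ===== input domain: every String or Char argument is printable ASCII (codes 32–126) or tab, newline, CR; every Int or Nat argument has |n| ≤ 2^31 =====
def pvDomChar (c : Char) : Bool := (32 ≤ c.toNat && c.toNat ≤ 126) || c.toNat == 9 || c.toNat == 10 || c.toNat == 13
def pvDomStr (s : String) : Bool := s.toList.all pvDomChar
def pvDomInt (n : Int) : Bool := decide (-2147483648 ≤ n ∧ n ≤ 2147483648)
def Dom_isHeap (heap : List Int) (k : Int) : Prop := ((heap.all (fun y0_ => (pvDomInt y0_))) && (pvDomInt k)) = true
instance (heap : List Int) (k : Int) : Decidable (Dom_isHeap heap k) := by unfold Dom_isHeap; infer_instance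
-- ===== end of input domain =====

-- B replaces A's binary recursion with an iterative worklist loop over an explicit stack (alternative decomposition, same cost).

-- heap[i] (PySem.List.pyGet?): under Pre_ every access either port performs is in range, so the
-- .getD 0 default (Python's IndexError) is never used on admitted inputs.
def hGet (heap : List Int) (i : Int) : Int := (PySem.List.pyGet? heap i).getD 0

-- ===== PORT A =====
-- A's recursion does not terminate for k ≤ 0; the fuel argument only makes the definition total
-- (under Pre_ the initial fuel heap.length + 1 is never exhausted).
def isHeapFuel (heap : List Int) (k : Int) : Nat → Bool
  | 0 => true
  | fuel + 1 =>
    let left := 2 * k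
    let right := 2 * k + 1
    if left = (heap.length : Int) then true
    else if (heap.length : Int) = right ∧ hGet heap k > hGet heap left then false
    else if right < (heap.length : Int) then
      if hGet heap k > hGet heap left ∨ hGet heap k > hGet heap right then false
      else isHeapFuel heap left fuel && isHeapFuel heap right fuel
    else true

def isHeap (heap : List Int) (k : Int) : Bool := isHeapFuel heap k (heap.length + 1)

-- ===== PORT B =====
-- B's while-loop over the explicit stack; the Lean list holds the Python stack top-first
-- (Python's stack.pop() = the head; 'append left; append right' = 'right :: left :: rest').
-- B's loop runs forever for k ≤ 0; the fuel 2 ^ heap.length only makes the definition total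
-- (under Pre_ it is never exhausted).
def altLoop (heap : List Int) : Nat → List Int → Bool
  | _, [] => true
  | 0, _ :: _ => true
  | fuel + 1, node :: rest =>
    let n := (heap.length : Int)
    let left := 2 * node
    let right := 2 * node + 1
    if left = n then altLoop heap fuel rest
    else if right = n then
      if hGet heap node > hGet heap left then false else altLoop heap fuel rest
    else if right < n then
      if hGet heap node > hGet heap left ∨ hGet heap node > hGet heap right then false
      else altLoop heap fuel (right :: left :: rest)
    else altLoop heap fuel rest

def isHeap_alt (heap : List Int) (k : Int) : Bool := altLoop heap (2 ^ heap.length) [k]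

-- ===== PRECONDITION & SPEC =====
-- Pre_ restricts to root indices k ≥ 1 (the function's 1-based heap layout), plus the trivial
-- k = 0 cases with at most one element: for k = 0 on longer heaps A hits RecursionError and B
-- loops forever, and for negative k Python's negative-index wraparound makes A raise IndexError /
-- hit RecursionError or return an accidental value (which B happens to share, or diverge on).
def Pre_isHeap (heap : List Int) (k : Int) : Prop := 1 ≤ k ∨ (k = 0 ∧ heap.length ≤ 1)
instance (heap : List Int) (k : Int) : Decidable (Pre_isHeap heap k) := by unfold Pre_isHeap; infer_instance

def pvWitness_isHeap : List Int × Int := ([0, 1, 2, 3, 4, 5], 1)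

def Spec_isHeap (heap : List Int) (k : Int) (out : Bool) : Prop := out = isHeap_alt heap k
instance (heap : List Int) (k : Int) (out : Bool) : Decidable (Spec_isHeap heap k out) := by unfold Spec_isHeap; infer_instance

-- ===== CLAIM (what is proved, stated in full; the proofs are below) =====
def Claim_equal_isHeap : Prop := ∀ (heap : List Int) (k : Int), Dom_isHeap heap k → Pre_isHeap heap k → Spec_isHeap heap k (isHeap heap k)

-- ===== LEMMAS AND PROOFS =====

-- Reference predicate: the heap property of the subtree at node m+1 (index shifted by one so
-- that the recursion's measure heap.length - m decreases).
def goodM (heap : List Int) (m : Nat) : Bool :=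
  if 2 * m + 2 = heap.length then true
  else if 2 * m + 3 = heap.length then !(heap.getD (m + 1) 0 > heap.getD (2 * m + 2) 0)
  else if 2 * m + 3 < heap.length then
    if heap.getD (m + 1) 0 > heap.getD (2 * m + 2) 0 || heap.getD (m + 1) 0 > heap.getD (2 * m + 3) 0 then false
    else goodM heap (2 * m + 1) && goodM heap (2 * m + 2)
  else true
termination_by heap.length - m
decreasing_by all_goals omega

-- Number of loop iterations B spends on the subtree of node m+1.
def sizeG (heap : List Int) (m : Nat) : Nat :=
  if 2 * m + 3 < heap.length then 1 + sizeG heap (2 * m + 1) + sizeG heap (2 * m + 2) else 1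
termination_by heap.length - m
decreasing_by all_goals omega

theorem one_le_sizeG (heap : List Int) (m : Nat) : 1 ≤ sizeG heap m := by
  unfold sizeG; split <;> omega

theorem hGet_nonneg (heap : List Int) (i : Int) (h : 0 ≤ i) :
    hGet heap i = heap.getD i.toNat 0 := by
  rw [hGet, PySem.List.pyGet?_of_nonneg _ h, List.getD_eq_getElem?_getD]

theorem sizeG_le (heap : List Int) (m : Nat) : sizeG heap m ≤ 2 ^ (heap.length - m) := by
  fun_induction sizeG heap m with
  | case1 m h ih1 ih2 =>
    have h1 : 2 ^ (heap.length - (2*m+1)) ≤ 2 ^ (heap.length - m - 1) :=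
      Nat.pow_le_pow_right (by norm_num) (by omega)
    have h2 : 2 ^ (heap.length - (2*m+2)) ≤ 2 ^ (heap.length - m - 2) :=
      Nat.pow_le_pow_right (by norm_num) (by omega)
    have h3 : (1:Nat) ≤ 2 ^ (heap.length - m - 2) := Nat.one_le_two_pow
    have h4 : 2 ^ (heap.length - m - 2) + 2 ^ (heap.length - m - 2) = 2 ^ (heap.length - m - 1) := by
      rw [← two_mul, ← pow_succ']; congr 1; omega
    have h5 : 2 ^ (heap.length - m - 1) + 2 ^ (heap.length - m - 1) = 2 ^ (heap.length - m) := by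
      rw [← two_mul, ← pow_succ']; congr 1; omega
    omega
  | case2 m h => exact Nat.one_le_two_pow

theorem isHeapFuel_eq_goodM (heap : List Int) (fuel : Nat) (k : Int) (hk : 1 ≤ k)
    (hf : (heap.length : Int) < k + fuel) :
    isHeapFuel heap k fuel = goodM heap (k - 1).toNat := by
  induction fuel generalizing k with
  | zero =>
    rw [goodM]
    simp only [isHeapFuel]
    rw [if_neg (show ¬(2 * (k - 1).toNat + 2 = heap.length) by omega),
        if_neg (show ¬(2 * (k - 1).toNat + 3 = heap.length) by omega),
        if_neg (show ¬(2 * (k - 1).toNat + 3 < heap.length) by omega)]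
  | succ fuel ih =>
    have e1 : hGet heap k = heap.getD ((k - 1).toNat + 1) 0 := by
      rw [hGet_nonneg heap k (by omega)]; congr 1; omega
    have e2 : hGet heap (2 * k) = heap.getD (2 * (k - 1).toNat + 2) 0 := by
      rw [hGet_nonneg heap _ (by omega)]; congr 1; omega
    have e3 : hGet heap (2 * k + 1) = heap.getD (2 * (k - 1).toNat + 3) 0 := by
      rw [hGet_nonneg heap _ (by omega)]; congr 1; omega
    rw [goodM]
    simp only [isHeapFuel, e1, e2, e3]
    by_cases h1 : 2 * k = (heap.length : Int)
    · rw [if_pos h1, if_pos (show 2 * (k - 1).toNat + 2 = heap.length by omega)]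
    · rw [if_neg h1, if_neg (show ¬(2 * (k - 1).toNat + 2 = heap.length) by omega)]
      by_cases h2 : (heap.length : Int) = 2 * k + 1
      · rw [if_pos (show 2 * (k - 1).toNat + 3 = heap.length by omega)]
        by_cases h3 : heap.getD ((k - 1).toNat + 1) 0 > heap.getD (2 * (k - 1).toNat + 2) 0
        · rw [if_pos (show (heap.length : Int) = 2 * k + 1 ∧
              heap.getD ((k - 1).toNat + 1) 0 > heap.getD (2 * (k - 1).toNat + 2) 0 from ⟨h2, h3⟩)]
          rw [decide_eq_true h3]; rfl
        · rw [if_neg (show ¬((heap.length : Int) = 2 * k + 1 ∧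
              heap.getD ((k - 1).toNat + 1) 0 > heap.getD (2 * (k - 1).toNat + 2) 0) by tauto),
              if_neg (show ¬(2 * k + 1 < (heap.length : Int)) by omega)]
          rw [decide_eq_false h3]; rfl
      · rw [if_neg (show ¬((heap.length : Int) = 2 * k + 1 ∧
            heap.getD ((k - 1).toNat + 1) 0 > heap.getD (2 * (k - 1).toNat + 2) 0) by tauto),
            if_neg (show ¬(2 * (k - 1).toNat + 3 = heap.length) by omega)]
        by_cases h4 : 2 * k + 1 < (heap.length : Int)
        · rw [if_pos h4, if_pos (show 2 * (k - 1).toNat + 3 < heap.length by omega)]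
          by_cases h5a : heap.getD ((k - 1).toNat + 1) 0 > heap.getD (2 * (k - 1).toNat + 2) 0
          · rw [if_pos (Or.inl h5a), if_pos (show _ = true by rw [decide_eq_true h5a]; rfl)]
          · by_cases h5b : heap.getD ((k - 1).toNat + 1) 0 > heap.getD (2 * (k - 1).toNat + 3) 0
            · rw [if_pos (Or.inr h5b), if_pos (show _ = true by rw [decide_eq_false h5a, decide_eq_true h5b]; rfl)]
            · rw [if_neg (show ¬(heap.getD ((k - 1).toNat + 1) 0 > heap.getD (2 * (k - 1).toNat + 2) 0 ∨
                  heap.getD ((k - 1).toNat + 1) 0 > heap.getD (2 * (k - 1).toNat + 3) 0) by tauto),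
                  if_neg (show ¬(_ = true) by rw [decide_eq_false h5a, decide_eq_false h5b]; simp)]
              have t1 : (2 * k - 1).toNat = 2 * (k - 1).toNat + 1 := by omega
              have t2 : (2 * k + 1 - 1).toNat = 2 * (k - 1).toNat + 2 := by omega
              have r1 := ih (2 * k) (by omega) (by push_cast at hf ⊢; omega)
              have r2 := ih (2 * k + 1) (by omega) (by push_cast at hf ⊢; omega)
              rw [r1, r2, t1, t2]
        · rw [if_neg h4, if_neg (show ¬(2 * (k - 1).toNat + 3 < heap.length) by omega)]

theorem altLoop_eq_all (heap : List Int) (fuel : Nat) (s : List Int)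
    (hs : ∀ j ∈ s, 1 ≤ j)
    (hf : (s.map (fun j => sizeG heap (j - 1).toNat)).sum ≤ fuel) :
    altLoop heap fuel s = s.all (fun j => goodM heap (j - 1).toNat) := by
  induction fuel generalizing s with
  | zero =>
    match s with
    | [] => rfl
    | node :: rest =>
      exfalso
      have h1 := one_le_sizeG heap (node - 1).toNat
      simp only [List.map_cons, List.sum_cons] at hf
      omega
  | succ fuel ih =>
    match s with
    | [] => rfl
    | node :: rest =>
      have hnode : 1 ≤ node := hs node (by simp)
      have hrest : ∀ j ∈ rest, 1 ≤ j := fun j hj => hs j (by simp [hj])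
      simp only [List.map_cons, List.sum_cons] at hf
      have hfr : (rest.map (fun j => sizeG heap (j - 1).toNat)).sum ≤ fuel := by
        have := one_le_sizeG heap (node - 1).toNat; omega
      have e1 : hGet heap node = heap.getD ((node - 1).toNat + 1) 0 := by
        rw [hGet_nonneg heap node (by omega)]; congr 1; omega
      have e2 : hGet heap (2 * node) = heap.getD (2 * (node - 1).toNat + 2) 0 := by
        rw [hGet_nonneg heap _ (by omega)]; congr 1; omega
      have e3 : hGet heap (2 * node + 1) = heap.getD (2 * (node - 1).toNat + 3) 0 := by
        rw [hGet_nonneg heap _ (by omega)]; congr 1; omega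
      rw [List.all_cons]
      simp only [altLoop, e1, e2, e3]
      rw [goodM]
      by_cases h1 : 2 * node = (heap.length : Int)
      · rw [if_pos h1, if_pos (show 2 * (node - 1).toNat + 2 = heap.length by omega)]
        rw [ih rest hrest hfr]; simp
      · rw [if_neg h1, if_neg (show ¬(2 * (node - 1).toNat + 2 = heap.length) by omega)]
        by_cases h2 : 2 * node + 1 = (heap.length : Int)
        · rw [if_pos h2, if_pos (show 2 * (node - 1).toNat + 3 = heap.length by omega)]
          by_cases h3 : heap.getD ((node - 1).toNat + 1) 0 > heap.getD (2 * (node - 1).toNat + 2) 0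
          · rw [if_pos h3, decide_eq_true h3]; simp
          · rw [if_neg h3, decide_eq_false h3, ih rest hrest hfr]; simp
        · rw [if_neg h2, if_neg (show ¬(2 * (node - 1).toNat + 3 = heap.length) by omega)]
          by_cases h4 : 2 * node + 1 < (heap.length : Int)
          · rw [if_pos h4, if_pos (show 2 * (node - 1).toNat + 3 < heap.length by omega)]
            by_cases h5a : heap.getD ((node - 1).toNat + 1) 0 > heap.getD (2 * (node - 1).toNat + 2) 0
            · rw [if_pos (Or.inl h5a), if_pos (show _ = true by rw [decide_eq_true h5a]; rfl)]
              simp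
            · by_cases h5b : heap.getD ((node - 1).toNat + 1) 0 > heap.getD (2 * (node - 1).toNat + 3) 0
              · rw [if_pos (Or.inr h5b),
                    if_pos (show _ = true by rw [decide_eq_false h5a, decide_eq_true h5b]; rfl)]
                simp
              · rw [if_neg (show ¬(heap.getD ((node - 1).toNat + 1) 0 > heap.getD (2 * (node - 1).toNat + 2) 0 ∨
                      heap.getD ((node - 1).toNat + 1) 0 > heap.getD (2 * (node - 1).toNat + 3) 0) by tauto),
                    if_neg (show ¬(_ = true) by rw [decide_eq_false h5a, decide_eq_false h5b]; simp)]
                have hsz : sizeG heap (node - 1).toNat =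
                    1 + sizeG heap (2 * (node - 1).toNat + 1) + sizeG heap (2 * (node - 1).toNat + 2) := by
                  rw [sizeG, if_pos (show 2 * (node - 1).toNat + 3 < heap.length by omega)]
                have t1 : (2 * node - 1).toNat = 2 * (node - 1).toNat + 1 := by omega
                have t2 : (2 * node + 1 - 1).toNat = 2 * (node - 1).toNat + 2 := by omega
                rw [ih ((2 * node + 1) :: 2 * node :: rest)
                    (by intro j hj; simp at hj; rcases hj with h | h | h; omega; omega; exact hrest j h)
                    (by simp only [List.map_cons, List.sum_cons, t1, t2]; omega)]
                simp only [List.all_cons, t1, t2]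
                cases goodM heap (2 * (node - 1).toNat + 1) <;>
                  cases goodM heap (2 * (node - 1).toNat + 2) <;> simp
          · rw [if_neg h4, if_neg (show ¬(2 * (node - 1).toNat + 3 < heap.length) by omega)]
            rw [ih rest hrest hfr]; simp

-- ===== VERDICT (by name: the statement is the Claim_ definition above) =====
theorem isHeap_spec : Claim_equal_isHeap := by
  intro heap k _ hpre
  unfold Spec_isHeap isHeap isHeap_alt
  rcases hpre with hk | ⟨rfl, hlen⟩
  · rw [isHeapFuel_eq_goodM heap _ k hk (by push_cast; omega)]
    rw [altLoop_eq_all heap _ [k] (by intro j hj; simp at hj; omega)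
        (by simpa using le_trans (sizeG_le heap (k - 1).toNat) (Nat.pow_le_pow_right (by norm_num) (by omega)))]
    simp
  · interval_cases h : heap.length
    · match heap, h with
      | [], _ => decide
    · match heap, h with
      | [a], _ =>
        simp [isHeapFuel, altLoop, hGet, PySem.List.pyGet?]
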